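-- pv_equiv track=rewrite | github.com/cdgtlmda/HavenHealthPassport | src/healthcare/regulatory/iso27001/access_management.py | _has_conflicting_roles
-- ===== SOURCE A (Python) =====
-- from typing import Any, Dict, List, Optional, Set, Tuple
--
-- def _has_conflicting_roles(role_ids: List[str]) -> bool:
--     """Check if user has conflicting roles (separation of duties)."""
--     # Define conflicting role combinations
--     conflicts = [
--         {"ROLE-HC-PROVIDER", "ROLE-SYS-ADMIN"},
--         {"ROLE-COMPLIANCE", "ROLE-HC-ADMIN"},
--         {"ROLE-SYS-ADMIN", "ROLE-COMPLIANCE"},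
--     ]
--
--     user_roles = set(role_ids)
--
--     for conflict_set in conflicts:
--         if conflict_set.issubset(user_roles):
--             return True
--
--     return False
-- ===== SOURCE B (Python) =====
-- def _has_conflicting_roles(role_ids):
--     """Check if user has conflicting roles (separation of duties)."""
--     # Index of conflicting pairs as frozensets, checked per user role pair.
--     conflict_index = {
--         frozenset({"ROLE-HC-PROVIDER", "ROLE-SYS-ADMIN"}),
--         frozenset({"ROLE-COMPLIANCE", "ROLE-HC-ADMIN"}),
--         frozenset({"ROLE-SYS-ADMIN", "ROLE-COMPLIANCE"}),
--     }
--     domain = frozenset().union(*conflict_index)  # roles any conflict mentions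
--     # distinct roles that can possibly conflict, in stable order
--     user_roles = [r for r in dict.fromkeys(role_ids) if r in domain]
--     for i in range(len(user_roles)):
--         for j in range(i + 1, len(user_roles)):
--             if frozenset((user_roles[i], user_roles[j])) in conflict_index:
--                 return True
--     return False
-- ===== Notes on version B (the rewrite author's own statement) =====
-- stated objective: alternative
-- what changed: Inverts the traversal: instead of scanning fixed conflict sets and testing issubset against set(role_ids), B keeps only the user's distinct roles mentioned by some conflict, enumerates their unordered pairs, and tests each pair for membership in a frozenset index of conflicts.
import Mathlib
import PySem

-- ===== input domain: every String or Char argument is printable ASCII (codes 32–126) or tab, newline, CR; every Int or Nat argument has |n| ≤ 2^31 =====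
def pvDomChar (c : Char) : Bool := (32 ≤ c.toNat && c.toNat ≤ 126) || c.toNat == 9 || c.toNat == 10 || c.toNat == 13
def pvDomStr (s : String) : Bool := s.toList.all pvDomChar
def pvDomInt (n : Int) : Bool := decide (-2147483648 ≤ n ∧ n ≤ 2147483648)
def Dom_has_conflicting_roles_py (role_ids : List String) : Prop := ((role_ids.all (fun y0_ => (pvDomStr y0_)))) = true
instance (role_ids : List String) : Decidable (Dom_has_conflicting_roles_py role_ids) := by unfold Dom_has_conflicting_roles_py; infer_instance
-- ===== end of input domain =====

-- B inverts the traversal: it enumerates unordered pairs of the user's distinct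
-- roles and looks each pair up in a conflict-pair index, instead of testing each
-- fixed conflict set with issubset (objective: alternative, same cost).


-- ===== PORT A =====
-- conflicts = [ {...}, {...}, {...} ] (each set literal, as a PySem.Set i.e. nodup list)
def pvConflicts : List (PySem.Set String) :=
  [["ROLE-HC-PROVIDER", "ROLE-SYS-ADMIN"],
   ["ROLE-COMPLIANCE", "ROLE-HC-ADMIN"],
   ["ROLE-SYS-ADMIN", "ROLE-COMPLIANCE"]]

-- for conflict_set in conflicts: if conflict_set.issubset(user_roles): return True / return False
def has_conflicting_roles_py (role_ids : List String) : Bool :=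
  let user_roles := PySem.Set.ofList role_ids
  pvConflicts.any (fun conflict_set => PySem.Set.issubset conflict_set user_roles)

-- ===== PORT B =====
-- conflict_index: each conflict as an (unordered) pair; frozenset membership =
-- match in either orientation
def pvConflictIndex : List (String × String) :=
  [("ROLE-HC-PROVIDER", "ROLE-SYS-ADMIN"),
   ("ROLE-COMPLIANCE", "ROLE-HC-ADMIN"),
   ("ROLE-SYS-ADMIN", "ROLE-COMPLIANCE")]

def pvPairHit (a b : String) : Bool :=
  pvConflictIndex.any (fun p => (a == p.1 && b == p.2) || (a == p.2 && b == p.1))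

-- r in domain: role mentioned by some conflict pair
def pvRelevant (r : String) : Bool :=
  pvConflictIndex.any (fun p => r == p.1 || r == p.2)

-- the i < j double loop over user_roles, as structural recursion
def pvPairs : List String → List (String × String)
  | [] => []
  | x :: xs => xs.map (fun y => (x, y)) ++ pvPairs xs

def has_conflicting_roles_py_alt (role_ids : List String) : Bool :=
  let user_roles := (PySem.List.dedup role_ids).filter pvRelevant
  (pvPairs user_roles).any (fun p => pvPairHit p.1 p.2)

-- ===== PRECONDITION & SPEC =====
def Spec_has_conflicting_roles_py (role_ids : List String) (out : Bool) : Prop := out = has_conflicting_roles_py_alt role_ids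
instance (role_ids : List String) (out : Bool) : Decidable (Spec_has_conflicting_roles_py role_ids out) := by unfold Spec_has_conflicting_roles_py; infer_instance

-- ===== CLAIM (what is proved, stated in full; the proofs are below) =====
def Claim_equal_has_conflicting_roles_py : Prop := ∀ (role_ids : List String), Dom_has_conflicting_roles_py role_ids → Spec_has_conflicting_roles_py role_ids (has_conflicting_roles_py role_ids)

-- ===== LEMMAS AND PROOFS =====

-- members of an enumerated pair are members of the list
theorem pvPairs_mem {p : String × String} {l : List String}
    (h : p ∈ pvPairs l) : p.1 ∈ l ∧ p.2 ∈ l := by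
  induction l with
  | nil => simp [pvPairs] at h
  | cons x xs ih =>
    simp only [pvPairs, List.mem_append, List.mem_map] at h
    rcases h with ⟨y, hy, rfl⟩ | h
    · exact ⟨List.mem_cons_self, List.mem_cons_of_mem _ hy⟩
    · exact ⟨List.mem_cons_of_mem _ (ih h).1, List.mem_cons_of_mem _ (ih h).2⟩

-- two distinct members of a list appear as a pair in one of the two orders
theorem pvPairs_of_mem {a b : String} {l : List String}
    (ha : a ∈ l) (hb : b ∈ l) (hne : a ≠ b) :
    (a, b) ∈ pvPairs l ∨ (b, a) ∈ pvPairs l := by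
  induction l with
  | nil => cases ha
  | cons x xs ih =>
    simp only [pvPairs, List.mem_append, List.mem_map, Prod.mk.injEq]
    rcases List.mem_cons.mp ha with rfl | ha'
    · rcases List.mem_cons.mp hb with rfl | hb'
      · exact absurd rfl hne
      · exact Or.inl (Or.inl ⟨b, hb', rfl, rfl⟩)
    · rcases List.mem_cons.mp hb with rfl | hb'
      · exact Or.inr (Or.inl ⟨a, ha', rfl, rfl⟩)
      · rcases ih ha' hb' with h | h
        · exact Or.inl (Or.inr h)
        · exact Or.inr (Or.inr h)

theorem pvPairHit_symm (a b : String) : pvPairHit a b = pvPairHit b a := by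
  rw [Bool.eq_iff_iff]
  simp [pvPairHit, pvConflictIndex]
  tauto

-- characterisation of A as membership facts
theorem pvA_iff (l : List String) :
    has_conflicting_roles_py l = true ↔
      (("ROLE-HC-PROVIDER" ∈ l ∧ "ROLE-SYS-ADMIN" ∈ l) ∨
       ("ROLE-COMPLIANCE" ∈ l ∧ "ROLE-HC-ADMIN" ∈ l) ∨
       ("ROLE-SYS-ADMIN" ∈ l ∧ "ROLE-COMPLIANCE" ∈ l)) := by
  simp [has_conflicting_roles_py, pvConflicts,
        PySem.Set.issubset_iff, PySem.Set.mem_ofList]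

-- characterisation of B as the same membership facts
theorem pvB_iff (l : List String) :
    has_conflicting_roles_py_alt l = true ↔
      (("ROLE-HC-PROVIDER" ∈ l ∧ "ROLE-SYS-ADMIN" ∈ l) ∨
       ("ROLE-COMPLIANCE" ∈ l ∧ "ROLE-HC-ADMIN" ∈ l) ∨
       ("ROLE-SYS-ADMIN" ∈ l ∧ "ROLE-COMPLIANCE" ∈ l)) := by
  simp only [has_conflicting_roles_py_alt, List.any_eq_true]
  constructor
  · rintro ⟨⟨a, b⟩, hmem, hhit⟩
    obtain ⟨ha, hb⟩ := pvPairs_mem hmem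
    rw [List.mem_filter, PySem.List.mem_dedup] at ha hb
    obtain ⟨ha, -⟩ := ha
    obtain ⟨hb, -⟩ := hb
    simp only [pvPairHit, pvConflictIndex, List.any_eq_true, List.mem_cons,
      List.not_mem_nil, or_false, beq_iff_eq, Bool.or_eq_true,
      Bool.and_eq_true] at hhit
    rcases hhit with ⟨p, hp, hcase⟩
    rcases hp with rfl | rfl | rfl
    all_goals rcases hcase with ⟨rfl, rfl⟩ | ⟨rfl, rfl⟩
    all_goals tauto
  · intro h
    have hget : ∀ a b : String, a ∈ l → b ∈ l → a ≠ b →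
        pvRelevant a = true → pvRelevant b = true → pvPairHit a b = true →
        ∃ p ∈ pvPairs ((PySem.List.dedup l).filter pvRelevant), pvPairHit p.1 p.2 = true := by
      intro a b ha hb hne hra hrb hhit
      have ha' := List.mem_filter.mpr ⟨(PySem.List.mem_dedup l a).mpr ha, hra⟩
      have hb' := List.mem_filter.mpr ⟨(PySem.List.mem_dedup l b).mpr hb, hrb⟩
      rcases pvPairs_of_mem ha' hb' hne with hp | hp
      · exact ⟨(a, b), hp, hhit⟩
      · exact ⟨(b, a), hp, by rw [← pvPairHit_symm]; exact hhit⟩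
    rcases h with ⟨h1, h2⟩ | ⟨h1, h2⟩ | ⟨h1, h2⟩
    · exact hget _ _ h1 h2 (by decide) (by decide) (by decide) (by decide)
    · exact hget _ _ h1 h2 (by decide) (by decide) (by decide) (by decide)
    · exact hget _ _ h1 h2 (by decide) (by decide) (by decide) (by decide)

-- ===== VERDICT (by name: the statement is the Claim_ definition above) =====
theorem has_conflicting_roles_py_spec : Claim_equal_has_conflicting_roles_py := by
  intro l _
  unfold Spec_has_conflicting_roles_py
  have := (pvA_iff l).trans (pvB_iff l).symm
  exact Bool.eq_iff_iff.mpr this
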